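-- pv_equiv track=rewrite | github.com/okara83/Becoming-a-Data-Scientist | Data Science and Machine Learning/Machine-Learning-In-Python-THOROUGH/EXAMPLES/EDABIT/EXPERT/001_100/85_patterned_wristband.py | is_wristband
-- ===== SOURCE A (Python) =====
-- def is_wristband(lst):
--     h,v,dl,dr,result=[], [], [], [], []
--
--     #check for horizontal:
--     for i in lst:
--         for j in range(1,len(lst[0])):
--             if i[j]==i[j-1]: h.append(1)
--             else: h.append(0)
--
--     #check for vertical:
--     for i in range(len(lst[0])):
--         for j in range(1,len(lst)):
--             if lst[j][i] == lst[j-1][i]: v.append(1)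
--             else: v.append(0)
--
--     #check for diagonal left:
--     for i in range(1,len(lst)):
--         for j in range(1,len(lst[0])):
--             if lst[i][j] == lst[i-1][j-1]: dl.append(1)
--             else: dl.append(0)
--
--     #check for diagonal right:
--     for i in range(1,len(lst)):
--         for j in range(1,len(lst[0])):
--             if lst[::-1][i][j] == lst[::-1][i-1][j-1]: dr.append(1)
--             else: dr.append(0)
--
--     for i in (h,v,dl,dr):
--         if not 0 in i: result.append(1)
--
--
--     if sum(result) > 0 :return True
--     return False
-- ===== SOURCE B (Python) =====
-- def is_wristband(lst):
--     n, w = len(lst), len(lst[0])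
--     cells = [(i, j) for i in range(n) for j in range(w)]
--     horiz = all(lst[i][j] == lst[i][0] for (i, j) in cells)
--     vert = all(lst[i][j] == lst[0][j] for (i, j) in cells)
--     diag = all(lst[i][j] == (lst[i - j][0] if j <= i else lst[0][j - i])
--                for (i, j) in cells)
--     anti = all(lst[i][j] == (lst[0][i + j] if i + j < w else lst[i + j - w + 1][w - 1])
--                for (i, j) in cells)
--     return horiz or vert or diag or anti
-- ===== Notes on version B (the rewrite author's own statement) =====
-- stated objective: faster
-- what changed: Instead of four pairs of nested adjacent-cell scans that build 0/1 lists (re-reversing the whole grid at every cell of the last scan) and then test '0 in' each list, B makes one cell list and compares every cell against its direction's canonical representative (row head, column head, diagonal head, anti-diagonal head), short-circuiting per direction.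
-- outside the precondition, e.g. on is_wristband([]): A raises IndexError, B raises IndexError; on is_wristband([[1, 2], [3]]): A raises IndexError, B raises IndexError
import Mathlib
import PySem

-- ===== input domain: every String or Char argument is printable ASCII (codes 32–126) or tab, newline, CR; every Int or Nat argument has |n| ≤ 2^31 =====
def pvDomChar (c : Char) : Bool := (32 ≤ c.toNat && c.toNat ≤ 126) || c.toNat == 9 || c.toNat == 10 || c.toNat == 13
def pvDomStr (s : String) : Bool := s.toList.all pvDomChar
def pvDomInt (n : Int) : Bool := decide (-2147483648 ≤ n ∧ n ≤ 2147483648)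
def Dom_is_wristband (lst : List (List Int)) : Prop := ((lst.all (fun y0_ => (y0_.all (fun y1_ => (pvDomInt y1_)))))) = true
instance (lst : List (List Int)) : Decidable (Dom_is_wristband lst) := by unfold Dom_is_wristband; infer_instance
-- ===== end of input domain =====

-- B replaces A's four pairs of nested adjacent-cell scans (the last of which re-reverses the
-- whole grid at every cell) by one cell list compared against each direction's canonical
-- representative cell; objective: faster (no per-cell list reversal) and a different algorithm.

-- ===== PORT A =====
-- row[j] (IndexError → default, excluded by Pre_)
def pvCellRow (row : List Int) (j : Int) : Int := (PySem.List.pyGet? row j).getD 0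
-- lst[i][j] (IndexError → default, excluded by Pre_)
def pvCell (lst : List (List Int)) (i j : Int) : Int := pvCellRow ((PySem.List.pyGet? lst i).getD []) j

def is_wristband (lst : List (List Int)) : Bool :=
  let h := lst.foldl (fun h i =>
      (PySem.List.pyRange 1 (PySem.List.len ((PySem.List.pyGet? lst 0).getD [])) 1).foldl
        (fun h j => if pvCellRow i j = pvCellRow i (j - 1) then h ++ [(1:Int)] else h ++ [(0:Int)]) h) []
  let v := (PySem.List.pyRange 0 (PySem.List.len ((PySem.List.pyGet? lst 0).getD [])) 1).foldl (fun v i =>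
      (PySem.List.pyRange 1 (PySem.List.len lst) 1).foldl
        (fun v j => if pvCell lst j i = pvCell lst (j - 1) i then v ++ [(1:Int)] else v ++ [(0:Int)]) v) []
  let dl := (PySem.List.pyRange 1 (PySem.List.len lst) 1).foldl (fun dl i =>
      (PySem.List.pyRange 1 (PySem.List.len ((PySem.List.pyGet? lst 0).getD [])) 1).foldl
        (fun dl j => if pvCell lst i j = pvCell lst (i - 1) (j - 1) then dl ++ [(1:Int)] else dl ++ [(0:Int)]) dl) []
  let dr := (PySem.List.pyRange 1 (PySem.List.len lst) 1).foldl (fun dr i =>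
      (PySem.List.pyRange 1 (PySem.List.len ((PySem.List.pyGet? lst 0).getD [])) 1).foldl
        (fun dr j =>
          if pvCell ((PySem.List.slice? lst none none (-1)).getD []) i j
             = pvCell ((PySem.List.slice? lst none none (-1)).getD []) (i - 1) (j - 1)
          then dr ++ [(1:Int)] else dr ++ [(0:Int)]) dr) []
  let result := [h, v, dl, dr].foldl (fun result i => if ¬ (0:Int) ∈ i then result ++ [(1:Int)] else result) []
  if result.sum > 0 then true else false

-- ===== PORT B =====
def is_wristband_alt (lst : List (List Int)) : Bool :=
  let n := PySem.List.len lst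
  let w := PySem.List.len ((PySem.List.pyGet? lst 0).getD [])
  let cells := (PySem.List.pyRange 0 n 1).flatMap (fun i => (PySem.List.pyRange 0 w 1).map (fun j => (i, j)))
  let horiz := cells.all (fun p => pvCell lst p.1 p.2 == pvCell lst p.1 0)
  let vert := cells.all (fun p => pvCell lst p.1 p.2 == pvCell lst 0 p.2)
  let diag := cells.all (fun p => pvCell lst p.1 p.2 ==
      (if p.2 ≤ p.1 then pvCell lst (p.1 - p.2) 0 else pvCell lst 0 (p.2 - p.1)))
  let anti := cells.all (fun p => pvCell lst p.1 p.2 ==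
      (if p.1 + p.2 < w then pvCell lst 0 (p.1 + p.2) else pvCell lst (p.1 + p.2 - w + 1) (w - 1)))
  horiz || vert || diag || anti

-- ===== PRECONDITION & SPEC =====
-- Pre_ excludes exactly the inputs where the Python raises IndexError: the empty grid
-- (lst[0] fails) and, when row 0 is nonempty, grids with a row shorter than row 0.
def Pre_is_wristband (lst : List (List Int)) : Prop :=
  lst ≠ [] ∧ ((lst.getD 0 []).length = 0 ∨ ∀ r ∈ lst, (lst.getD 0 []).length ≤ r.length)
instance (lst : List (List Int)) : Decidable (Pre_is_wristband lst) := by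
  unfold Pre_is_wristband; infer_instance
def pvWitness_is_wristband : List (List Int) := [[1, 2], [1, 2]]

def Spec_is_wristband (lst : List (List Int)) (out : Bool) : Prop := out = is_wristband_alt lst
instance (lst : List (List Int)) (out : Bool) : Decidable (Spec_is_wristband lst out) := by unfold Spec_is_wristband; infer_instance

-- ===== CLAIM (what is proved, stated in full; the proofs are below) =====
def Claim_equal_is_wristband : Prop := ∀ (lst : List (List Int)), Dom_is_wristband lst → Pre_is_wristband lst → Spec_is_wristband lst (is_wristband lst)

-- ===== LEMMAS AND PROOFS =====

theorem horiz_equiv (a : Nat → Int) (w : Nat) :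
    (∀ j, 1 ≤ j → j < w → a j = a (j-1)) ↔ (∀ j < w, a j = a 0) := by
  constructor
  · intro h j hj
    induction j with
    | zero => rfl
    | succ k ih =>
      have step := h (k+1) (by omega) hj
      simpa [Nat.add_sub_cancel] using step.trans (ih (by omega))
  · intro h j h1 hj
    rw [h j hj, h (j-1) (by omega)]

theorem diag_equiv (a : Nat → Nat → Int) (n w : Nat) :
    (∀ i, 1 ≤ i → i < n → ∀ j, 1 ≤ j → j < w → a i j = a (i-1) (j-1)) ↔
    (∀ i < n, ∀ j < w, a i j = if j ≤ i then a (i-j) 0 else a 0 (j-i)) := by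
  constructor
  · intro h i hi j hj
    induction j generalizing i with
    | zero => simp
    | succ k ih =>
      cases i with
      | zero => simp
      | succ m =>
        have step := h (m+1) (by omega) hi (k+1) (by omega) hj
        simp only [Nat.add_sub_cancel] at step
        rw [step, ih m (by omega) (by omega)]
        by_cases hkm : k ≤ m
        · simp [hkm, show k+1 ≤ m+1 by omega, show m+1-(k+1) = m-k by omega]
        · simp [hkm, show ¬(k+1 ≤ m+1) by omega, show (k+1)-(m+1) = k-m by omega]
  · intro h i h1 hi j h1j hj
    rw [h i hi j hj, h (i-1) (by omega) (j-1) (by omega)]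
    by_cases hji : j ≤ i
    · simp [hji, show j-1 ≤ i-1 by omega, show i-1-(j-1) = i-j by omega]
    · simp [hji, show ¬(j-1 ≤ i-1) by omega, show (j-1)-(i-1) = j-i by omega]

theorem anti_equiv (a : Nat → Nat → Int) (n w : Nat) :
    (∀ k, k+1 < n → ∀ j, 1 ≤ j → j < w → a k j = a (k+1) (j-1)) ↔
    (∀ i < n, ∀ j < w, a i j = if i + j < w then a 0 (i+j) else a (i+j-w+1) (w-1)) := by
  constructor
  · intro h i
    induction i with
    | zero => intro _ j hj; simp [hj]
    | succ m ih =>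
      intro hi j hj
      by_cases hjw : j + 1 < w
      · have step := (h m (by omega) (j+1) (by omega) hjw).symm
        simp only [Nat.add_sub_cancel] at step
        rw [step, ih (by omega) (j+1) hjw]
        by_cases hs : m + (j+1) < w
        · simp [hs, show m+1+j = m+(j+1) by omega]
        · simp [hs, show ¬(m+1+j < w) by omega, show m+1+j-w+1 = m+(j+1)-w+1 by omega]
      · rw [if_neg (by omega)]
        congr 1 <;> omega
  · intro h k hk j h1 hj
    rw [h k (by omega) j hj, h (k+1) (by omega) (j-1) (by omega)]
    by_cases hs : k + j < w
    · simp [hs, show k+1+(j-1) = k+j by omega]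
    · simp [hs, show ¬(k+1+(j-1) < w) by omega, show k+1+(j-1)-w+1 = k+j-w+1 by omega]


-- total cell access both ports reduce to on nonnegative indices
def aF (lst : List (List Int)) (i j : Nat) : Int := (lst.getD i []).getD j 0

-- the four directions in the shape A's scans state them
def AH (lst : List (List Int)) : Prop :=
  ∀ i < lst.length, ∀ j, 1 ≤ j → j < (lst.getD 0 []).length → aF lst i j = aF lst i (j-1)
def AV (lst : List (List Int)) : Prop :=
  ∀ j < (lst.getD 0 []).length, ∀ i, 1 ≤ i → i < lst.length → aF lst i j = aF lst (i-1) j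
def AD (lst : List (List Int)) : Prop :=
  ∀ i, 1 ≤ i → i < lst.length → ∀ j, 1 ≤ j → j < (lst.getD 0 []).length →
    aF lst i j = aF lst (i-1) (j-1)
def AR (lst : List (List Int)) : Prop :=
  ∀ k, k + 1 < lst.length → ∀ j, 1 ≤ j → j < (lst.getD 0 []).length →
    aF lst k j = aF lst (k+1) (j-1)

-- the four directions in the shape B states them (value determined by the class representative)
def BH (lst : List (List Int)) : Prop :=
  ∀ i < lst.length, ∀ j < (lst.getD 0 []).length, aF lst i j = aF lst i 0
def BV (lst : List (List Int)) : Prop :=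
  ∀ i < lst.length, ∀ j < (lst.getD 0 []).length, aF lst i j = aF lst 0 j
def BD (lst : List (List Int)) : Prop :=
  ∀ i < lst.length, ∀ j < (lst.getD 0 []).length,
    aF lst i j = if j ≤ i then aF lst (i-j) 0 else aF lst 0 (j-i)
def BR (lst : List (List Int)) : Prop :=
  ∀ i < lst.length, ∀ j < (lst.getD 0 []).length,
    aF lst i j = if i + j < (lst.getD 0 []).length then aF lst 0 (i+j)
      else aF lst (i + j - (lst.getD 0 []).length + 1) ((lst.getD 0 []).length - 1)

theorem pvCellRow_eq (row : List Int) (j : Int) (hj : 0 ≤ j) :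
    pvCellRow row j = row.getD j.toNat 0 := by
  rw [pvCellRow, PySem.List.pyGet?_of_nonneg row hj]; simp [List.getD]

theorem pvCell_eq (lst : List (List Int)) (i j : Int) (hi : 0 ≤ i) (hj : 0 ≤ j) :
    pvCell lst i j = aF lst i.toNat j.toNat := by
  rw [pvCell, PySem.List.pyGet?_of_nonneg lst hi, pvCellRow_eq _ _ hj]
  simp [aF, List.getD]

theorem wcast (lst : List (List Int)) :
    PySem.List.len ((PySem.List.pyGet? lst 0).getD []) = (((lst.getD 0 []).length : Nat) : Int) := by
  simp [PySem.List.len_eq, PySem.List.pyGet?_zero, List.getD]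

theorem build_mem_zero {α β : Type} (X : List α) (Y : List β) (c : α → β → Prop)
    [inst : ∀ a b, Decidable (c a b)] :
    ((0:Int) ∈ X.foldl (fun acc x => Y.foldl
        (fun acc y => if c x y then acc ++ [(1:Int)] else acc ++ [(0:Int)]) acc) [])
      ↔ ∃ x ∈ X, ∃ y ∈ Y, ¬ c x y := by
  have hf : (fun (acc : List Int) x => Y.foldl
        (fun acc y => if c x y then acc ++ [(1:Int)] else acc ++ [(0:Int)]) acc)
      = fun acc x => acc ++ Y.map (fun y => if c x y then (1:Int) else 0) := by
    funext acc x
    have : (fun (acc : List Int) y => if c x y then acc ++ [(1:Int)] else acc ++ [(0:Int)])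
        = fun acc y => acc ++ [if c x y then (1:Int) else 0] := by
      funext acc y; split <;> rfl
    rw [this, PySem.List.foldl_append_singleton_eq_map]
  rw [hf, PySem.List.foldl_append_eq_flatMap]
  simp [List.mem_flatMap, List.mem_map, ite_eq_right_iff]

theorem final_glue (h v dl dr : List Int) :
    ((if ([h, v, dl, dr].foldl
        (fun result i => if ¬ (0:Int) ∈ i then result ++ [(1:Int)] else result) []).sum > 0
      then true else false) = true)
    ↔ (¬ (0:Int) ∈ h ∨ ¬ (0:Int) ∈ v ∨ ¬ (0:Int) ∈ dl ∨ ¬ (0:Int) ∈ dr) := by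
  by_cases h1 : (0:Int) ∈ h <;> by_cases h2 : (0:Int) ∈ v <;>
    by_cases h3 : (0:Int) ∈ dl <;> by_cases h4 : (0:Int) ∈ dr <;>
    norm_num [List.foldl, h1, h2, h3, h4]

theorem aF_rev (lst : List (List Int)) (k j : Nat) (hk : k < lst.length) :
    aF lst.reverse k j = aF lst (lst.length - 1 - k) j := by
  unfold aF
  congr 1
  rw [List.getD_eq_getElem _ _ (by simpa using hk), List.getD_eq_getElem _ _ (by omega),
    List.getElem_reverse]

theorem aF_getElem (lst : List (List Int)) (i : Nat) (hi : i < lst.length) (j : Nat) :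
    aF lst i j = lst[i].getD j 0 := by
  unfold aF; congr 1; exact List.getD_eq_getElem lst [] hi

theorem row0_eq (lst : List (List Int)) :
    (PySem.List.pyGet? lst 0).getD [] = lst.getD 0 [] := by
  simp [PySem.List.pyGet?_zero, List.getD]

theorem pvCell_natCast (lst : List (List Int)) (i j : Nat) :
    pvCell lst (i : Int) (j : Int) = aF lst i j := by
  rw [pvCell_eq lst _ _ (Int.natCast_nonneg i) (Int.natCast_nonneg j)]; simp

theorem pvCell_zero_right (lst : List (List Int)) (i : Nat) :
    pvCell lst (i : Int) 0 = aF lst i 0 := by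
  rw [pvCell_eq lst _ _ (Int.natCast_nonneg i) le_rfl]; simp

theorem pvCell_zero_left (lst : List (List Int)) (j : Nat) :
    pvCell lst 0 (j : Int) = aF lst 0 j := by
  rw [pvCell_eq lst _ _ le_rfl (Int.natCast_nonneg j)]; simp

theorem convAH (lst : List (List Int)) :
    (∀ row ∈ lst, ∀ j ∈ PySem.List.pyRange 1 (((lst.getD 0 []).length : Nat) : Int) 1,
      pvCellRow row j = pvCellRow row (j - 1)) ↔ AH lst := by
  constructor
  · intro H i hi j h1 hj
    have h' := H lst[i] (lst.getElem_mem hi) (j : Int)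
      (by rw [PySem.List.mem_pyRange_one]; omega)
    rw [pvCellRow_eq _ _ (by positivity), pvCellRow_eq _ _ (by omega)] at h'
    rw [aF_getElem lst i hi, aF_getElem lst i hi]
    simpa [show ((j:Int) - 1).toNat = j - 1 by omega] using h'
  · intro H row hrow j hj
    rw [PySem.List.mem_pyRange_one] at hj
    obtain ⟨i, hi, rfl⟩ := List.mem_iff_getElem.mp hrow
    have h' := H i hi j.toNat (by omega) (by omega)
    rw [aF_getElem lst i hi, aF_getElem lst i hi] at h'
    rw [pvCellRow_eq _ _ (by omega), pvCellRow_eq _ _ (by omega)]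
    simpa [show (j - 1).toNat = j.toNat - 1 by omega] using h'

theorem convAV (lst : List (List Int)) :
    (∀ x ∈ PySem.List.pyRange 0 (((lst.getD 0 []).length : Nat) : Int) 1,
      ∀ y ∈ PySem.List.pyRange 1 ((lst.length : Nat) : Int) 1,
      pvCell lst y x = pvCell lst (y - 1) x) ↔ AV lst := by
  constructor
  · intro H j hj i h1 hi
    have h' := H (j : Int) (by rw [PySem.List.mem_pyRange_one]; omega)
      (i : Int) (by rw [PySem.List.mem_pyRange_one]; omega)
    rw [pvCell_eq _ _ _ (by positivity) (by positivity),
      pvCell_eq _ _ _ (by omega) (by positivity)] at h'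
    simpa [show ((i:Int) - 1).toNat = i - 1 by omega] using h'
  · intro H x hx y hy
    rw [PySem.List.mem_pyRange_one] at hx hy
    have h' := H x.toNat (by omega) y.toNat (by omega) (by omega)
    rw [pvCell_eq _ _ _ (by omega) (by omega), pvCell_eq _ _ _ (by omega) (by omega)]
    simpa [show (y - 1).toNat = y.toNat - 1 by omega] using h'

theorem convAD (lst : List (List Int)) :
    (∀ x ∈ PySem.List.pyRange 1 ((lst.length : Nat) : Int) 1,
      ∀ y ∈ PySem.List.pyRange 1 (((lst.getD 0 []).length : Nat) : Int) 1,
      pvCell lst x y = pvCell lst (x - 1) (y - 1)) ↔ AD lst := by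
  constructor
  · intro H i h1 hi j h1j hj
    have h' := H (i : Int) (by rw [PySem.List.mem_pyRange_one]; omega)
      (j : Int) (by rw [PySem.List.mem_pyRange_one]; omega)
    rw [pvCell_eq _ _ _ (by positivity) (by positivity),
      pvCell_eq _ _ _ (by omega) (by omega)] at h'
    simpa [show ((i:Int) - 1).toNat = i - 1 by omega,
      show ((j:Int) - 1).toNat = j - 1 by omega] using h'
  · intro H x hx y hy
    rw [PySem.List.mem_pyRange_one] at hx hy
    have h' := H x.toNat (by omega) (by omega) y.toNat (by omega) (by omega)
    rw [pvCell_eq _ _ _ (by omega) (by omega), pvCell_eq _ _ _ (by omega) (by omega)]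
    simpa [show (x - 1).toNat = x.toNat - 1 by omega,
      show (y - 1).toNat = y.toNat - 1 by omega] using h'

theorem convAR (lst : List (List Int)) :
    (∀ x ∈ PySem.List.pyRange 1 ((lst.length : Nat) : Int) 1,
      ∀ y ∈ PySem.List.pyRange 1 (((lst.getD 0 []).length : Nat) : Int) 1,
      pvCell lst.reverse x y = pvCell lst.reverse (x - 1) (y - 1)) ↔ AR lst := by
  constructor
  · intro H k hk j h1 hj
    have h' := H ((lst.length - 1 - k : Nat) : Int) (by rw [PySem.List.mem_pyRange_one]; omega)
      (j : Int) (by rw [PySem.List.mem_pyRange_one]; omega)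
    rw [pvCell_eq _ _ _ (by positivity) (by positivity),
      pvCell_eq _ _ _ (by omega) (by omega)] at h'
    simp only [Int.toNat_natCast,
      show (((lst.length - 1 - k : Nat) : Int) - 1).toNat = lst.length - 2 - k by omega,
      show ((j:Int) - 1).toNat = j - 1 by omega] at h'
    rw [aF_rev lst _ _ (by omega), aF_rev lst _ _ (by omega)] at h'
    rw [show lst.length - 1 - (lst.length - 1 - k) = k by omega,
      show lst.length - 1 - (lst.length - 2 - k) = k + 1 by omega] at h'
    exact h'
  · intro H x hx y hy
    rw [PySem.List.mem_pyRange_one] at hx hy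
    have h' := H (lst.length - 1 - x.toNat) (by omega) y.toNat (by omega) (by omega)
    rw [pvCell_eq _ _ _ (by omega) (by omega), pvCell_eq _ _ _ (by omega) (by omega)]
    rw [aF_rev lst _ _ (by omega), aF_rev lst _ _ (by omega)]
    rw [show (x - 1).toNat = x.toNat - 1 by omega, show (y - 1).toNat = y.toNat - 1 by omega]
    rw [show lst.length - 1 - (x.toNat - 1) = lst.length - 1 - x.toNat + 1 by omega]
    exact h'

theorem A_true_iff (lst : List (List Int)) :
    is_wristband lst = true ↔ (AH lst ∨ AV lst ∨ AD lst ∨ AR lst) := by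
  simp only [is_wristband]
  rw [wcast, PySem.List.len_eq, PySem.List.slice?_none_none_neg_one]
  simp only [Option.getD_some]
  refine Iff.trans (final_glue _ _ _ _) (or_congr ?_ (or_congr ?_ (or_congr ?_ ?_)))
  · refine Iff.trans (not_congr (build_mem_zero _ _ _)) ?_
    push Not
    exact convAH lst
  · refine Iff.trans (not_congr (build_mem_zero _ _ _)) ?_
    push Not
    exact convAV lst
  · refine Iff.trans (not_congr (build_mem_zero _ _ _)) ?_
    push Not
    exact convAD lst
  · refine Iff.trans (not_congr (build_mem_zero _ _ _)) ?_
    push Not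
    exact convAR lst

theorem dirH (lst : List (List Int)) :
    (∀ (x : Int × Int) (x1 : Int), 0 ≤ x1 → x1 < ((lst.length : Nat) : Int) →
      ∀ (x2 : Int), 0 ≤ x2 → x2 < (((lst.getD 0 []).length : Nat) : Int) →
      (x1, x2) = x → pvCell lst x.1 x.2 = pvCell lst x.1 0) ↔ BH lst := by
  constructor
  · intro H i hi j hj
    have h' := H ((i : Int), (j : Int)) i (by positivity) (by exact_mod_cast hi)
      j (by positivity) (by exact_mod_cast hj) rfl
    dsimp only at h'
    rwa [pvCell_natCast, pvCell_zero_right] at h'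
  · rintro H x x1 h0 hn x2 h0' hw rfl
    dsimp only
    have h' := H x1.toNat (by omega) x2.toNat (by omega)
    rw [pvCell_eq _ _ _ h0 h0', pvCell_eq _ _ _ h0 le_rfl]
    simpa using h'

theorem dirV (lst : List (List Int)) :
    (∀ (x : Int × Int) (x1 : Int), 0 ≤ x1 → x1 < ((lst.length : Nat) : Int) →
      ∀ (x2 : Int), 0 ≤ x2 → x2 < (((lst.getD 0 []).length : Nat) : Int) →
      (x1, x2) = x → pvCell lst x.1 x.2 = pvCell lst 0 x.2) ↔ BV lst := by
  constructor
  · intro H i hi j hj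
    have h' := H ((i : Int), (j : Int)) i (by positivity) (by exact_mod_cast hi)
      j (by positivity) (by exact_mod_cast hj) rfl
    dsimp only at h'
    rwa [pvCell_natCast, pvCell_zero_left] at h'
  · rintro H x x1 h0 hn x2 h0' hw rfl
    dsimp only
    have h' := H x1.toNat (by omega) x2.toNat (by omega)
    rw [pvCell_eq _ _ _ h0 h0', pvCell_eq _ _ _ le_rfl h0']
    simpa using h'

theorem dirD (lst : List (List Int)) :
    (∀ (x : Int × Int) (x1 : Int), 0 ≤ x1 → x1 < ((lst.length : Nat) : Int) →
      ∀ (x2 : Int), 0 ≤ x2 → x2 < (((lst.getD 0 []).length : Nat) : Int) →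
      (x1, x2) = x → pvCell lst x.1 x.2 =
        if x.2 ≤ x.1 then pvCell lst (x.1 - x.2) 0 else pvCell lst 0 (x.2 - x.1)) ↔ BD lst := by
  constructor
  · intro H i hi j hj
    have h' := H ((i : Int), (j : Int)) i (by positivity) (by exact_mod_cast hi)
      j (by positivity) (by exact_mod_cast hj) rfl
    dsimp only at h'
    rw [pvCell_natCast] at h'
    by_cases hc : j ≤ i
    · rw [if_pos (by exact_mod_cast hc)] at h'
      rw [if_pos hc]
      rwa [show ((i:Int) - (j:Int)) = ((i - j : Nat) : Int) by omega, pvCell_zero_right] at h'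
    · rw [if_neg (by omega)] at h'
      rw [if_neg hc]
      rwa [show ((j:Int) - (i:Int)) = ((j - i : Nat) : Int) by omega, pvCell_zero_left] at h'
  · rintro H x x1 h0 hn x2 h0' hw rfl
    dsimp only
    have h' := H x1.toNat (by omega) x2.toNat (by omega)
    rw [pvCell_eq _ _ _ h0 h0']
    by_cases hc : x2 ≤ x1
    · rw [if_pos hc, pvCell_eq _ _ _ (by omega) le_rfl]
      rw [if_pos (by omega)] at h'
      simpa [show (x1 - x2).toNat = x1.toNat - x2.toNat by omega] using h'
    · rw [if_neg hc, pvCell_eq _ _ _ le_rfl (by omega)]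
      rw [if_neg (by omega)] at h'
      simpa [show (x2 - x1).toNat = x2.toNat - x1.toNat by omega] using h'

theorem dirR (lst : List (List Int)) :
    (∀ (x : Int × Int) (x1 : Int), 0 ≤ x1 → x1 < ((lst.length : Nat) : Int) →
      ∀ (x2 : Int), 0 ≤ x2 → x2 < (((lst.getD 0 []).length : Nat) : Int) →
      (x1, x2) = x → pvCell lst x.1 x.2 =
        if x.1 + x.2 < (((lst.getD 0 []).length : Nat) : Int) then pvCell lst 0 (x.1 + x.2)
        else pvCell lst (x.1 + x.2 - (((lst.getD 0 []).length : Nat) : Int) + 1)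
          ((((lst.getD 0 []).length : Nat) : Int) - 1)) ↔ BR lst := by
  constructor
  · intro H i hi j hj
    have h' := H ((i : Int), (j : Int)) i (by positivity) (by exact_mod_cast hi)
      j (by positivity) (by exact_mod_cast hj) rfl
    dsimp only at h'
    rw [pvCell_natCast] at h'
    by_cases hc : i + j < (lst.getD 0 []).length
    · rw [if_pos (by exact_mod_cast hc)] at h'
      rw [if_pos hc]
      rwa [show ((i:Int) + (j:Int)) = ((i + j : Nat) : Int) by omega, pvCell_zero_left] at h'
    · rw [if_neg (by omega)] at h'
      rw [if_neg hc]
      rwa [show ((i:Int) + (j:Int) - (((lst.getD 0 []).length : Nat) : Int) + 1)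
          = ((i + j - (lst.getD 0 []).length + 1 : Nat) : Int) by omega,
        show ((((lst.getD 0 []).length : Nat) : Int) - 1)
          = (((lst.getD 0 []).length - 1 : Nat) : Int) by omega, pvCell_natCast] at h'
  · rintro H x x1 h0 hn x2 h0' hw rfl
    dsimp only
    have h' := H x1.toNat (by omega) x2.toNat (by omega)
    rw [pvCell_eq _ _ _ h0 h0']
    by_cases hc : x1 + x2 < (((lst.getD 0 []).length : Nat) : Int)
    · rw [if_pos hc, pvCell_eq _ _ _ le_rfl (by omega)]
      rw [if_pos (by omega)] at h'
      simpa [show (x1 + x2).toNat = x1.toNat + x2.toNat by omega] using h'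
    · rw [if_neg hc, pvCell_eq _ _ _ (by omega) (by omega)]
      rw [if_neg (by omega)] at h'
      rw [show (x1 + x2 - (((lst.getD 0 []).length : Nat) : Int) + 1).toNat
          = x1.toNat + x2.toNat - (lst.getD 0 []).length + 1 by omega,
        show ((((lst.getD 0 []).length : Nat) : Int) - 1).toNat
          = (lst.getD 0 []).length - 1 by omega]
      exact h'

theorem B_true_iff (lst : List (List Int)) :
    is_wristband_alt lst = true ↔ (BH lst ∨ BV lst ∨ BD lst ∨ BR lst) := by
  rw [is_wristband_alt]
  simp only [PySem.List.len_eq, Bool.or_eq_true, List.all_eq_true, List.mem_flatMap,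
    List.mem_map, PySem.List.mem_pyRange_one, beq_iff_eq, forall_exists_index, and_imp, row0_eq]
  refine Iff.trans (or_congr (or_congr (or_congr (dirH lst) (dirV lst)) (dirD lst)) (dirR lst)) (by tauto)

theorem AH_iff_BH (lst : List (List Int)) : AH lst ↔ BH lst := by
  unfold AH BH
  constructor
  · intro h i hi j hj
    exact (horiz_equiv (fun j => aF lst i j) _).mp (fun j h1 h2 => h i hi j h1 h2) j hj
  · intro h i hi j h1 h2
    exact (horiz_equiv (fun j => aF lst i j) _).mpr (fun j hj => h i hi j hj) j h1 h2

theorem AV_iff_BV (lst : List (List Int)) : AV lst ↔ BV lst := by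
  unfold AV BV
  constructor
  · intro h i hi j hj
    exact (horiz_equiv (fun i => aF lst i j) _).mp (fun i h1 h2 => h j hj i h1 h2) i hi
  · intro h j hj i h1 h2
    exact (horiz_equiv (fun i => aF lst i j) _).mpr (fun i hi => h i hi j hj) i h1 h2

theorem AD_iff_BD (lst : List (List Int)) : AD lst ↔ BD lst :=
  diag_equiv (aF lst) lst.length (lst.getD 0 []).length

theorem AR_iff_BR (lst : List (List Int)) : AR lst ↔ BR lst :=
  anti_equiv (aF lst) lst.length (lst.getD 0 []).length

-- ===== VERDICT (by name: the statement is the Claim_ definition above) =====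
theorem is_wristband_spec : Claim_equal_is_wristband := by
  intro lst _ _
  unfold Spec_is_wristband
  rw [Bool.eq_iff_iff, A_true_iff, B_true_iff]
  exact or_congr (AH_iff_BH lst) (or_congr (AV_iff_BV lst)
    (or_congr (AD_iff_BD lst) (AR_iff_BR lst)))
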